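-- pv_equiv track=rewrite | github.com/henry-wallace/L-systems-and-CAs | automaton.py | find_factorization
-- ===== SOURCE A (Python) =====
-- def find_factorization(x, alpha=1, beta=1):
--     """Return the tuple (n, m) that best factorizes x <= n*m such that x - n*m
--     is small and n is close to m. The weights of these two goals are
--     respectively alpha, beta."""
--     loss = lambda x, n, m: alpha*abs(x - n*m) + beta*abs(n - m)
--     def solve(x):
--         (n_min, m_min), loss_min = (None, None), float('inf')
--         for n in range(1, x + 1):
--             for m in range(n, x + 1):
--                 fval = loss(x, n, m)
--                 if fval < loss_min and x <= n*m:
--                     (n_min, m_min), loss_min = (n, m), fval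
--         return (n_min, m_min)
--     return solve(x)
-- ===== SOURCE B (Python) =====
-- def find_factorization(x, alpha=1, beta=1):
--     """For each n, the loss on valid pairs (m >= max(n, ceil(x/n))) is linear in m
--     with slope alpha*n + beta, so the per-n optimum is at one endpoint; scan n once."""
--     best = (None, None)
--     best_loss = None
--     for n in range(1, x + 1):
--         m0 = max(n, -(-x // n))          # smallest m >= n with x <= n*m
--         m = m0 if alpha * n + beta >= 0 else x
--         l = alpha * (n * m - x) + beta * (m - n)
--         if best_loss is None or l < best_loss:
--             best, best_loss = (n, m), l
--     return best
-- ===== Notes on version B (the rewrite author's own statement) =====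
-- stated objective: faster
-- what changed: B drops the inner m-loop: for each n the loss on valid pairs is linear in m with slope alpha*n+beta, so the per-n optimum is the endpoint max(n,ceil(x/n)) or x; one O(x) scan replaces the O(x^2) grid.
import Mathlib
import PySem

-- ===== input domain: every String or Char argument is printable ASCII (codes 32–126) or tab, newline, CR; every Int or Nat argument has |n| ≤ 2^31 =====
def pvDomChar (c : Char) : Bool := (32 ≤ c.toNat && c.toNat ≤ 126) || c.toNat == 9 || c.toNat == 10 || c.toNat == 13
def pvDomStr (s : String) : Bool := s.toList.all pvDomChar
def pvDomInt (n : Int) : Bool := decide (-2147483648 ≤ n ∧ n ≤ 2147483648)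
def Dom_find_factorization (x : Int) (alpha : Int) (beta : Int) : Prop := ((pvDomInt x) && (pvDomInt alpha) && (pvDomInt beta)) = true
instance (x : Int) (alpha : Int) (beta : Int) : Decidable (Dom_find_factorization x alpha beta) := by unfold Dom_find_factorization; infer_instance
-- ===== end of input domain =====

-- B replaces A's O(x^2) grid scan by one O(x) pass: per n the loss on valid pairs is
-- linear in m, so the per-n optimum is an endpoint (objective: faster, asymptotic).

-- shared helper: 'fval < loss_min' where loss_min starts as float('inf') (= none) and
-- afterwards always holds an Int; exact, since +inf compares greater than every int.
def pvLtInf (v : Int) (o : Option Int) : Bool :=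
  match o with
  | none => true
  | some c => decide (v < c)

-- ===== PORT A =====
-- state ((n_min, m_min), loss_min); loss_min = none models the initial float('inf')
def find_factorization (x : Int) (alpha : Int) (beta : Int) : Option Int × Option Int :=
  let loss : Int → Int → Int → Int := fun x n m => alpha * |x - n * m| + beta * |n - m|
  let solve : Int → Option Int × Option Int := fun x =>
    let final :=
      (PySem.List.pyRange 1 (x + 1) 1).foldl
        (fun st n =>
          (PySem.List.pyRange n (x + 1) 1).foldl
            (fun st m =>
              let fval := loss x n m
              if pvLtInf fval st.2 && decide (x ≤ n * m) then ((some n, some m), some fval) else st)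
            st)
        ((none, none), none)
    final.1
  solve x

-- ===== PORT B =====
def find_factorization_alt (x : Int) (alpha : Int) (beta : Int) : Option Int × Option Int :=
  let final :=
    (PySem.List.pyRange 1 (x + 1) 1).foldl
      (fun st n =>
        let m0 := max n (-(PySem.Int.floordiv (-x) n))
        let m := if alpha * n + beta ≥ 0 then m0 else x
        let l := alpha * (n * m - x) + beta * (m - n)
        if pvLtInf l st.2 then ((some n, some m), some l) else st)
      ((none, none), none)
  final.1

-- ===== PRECONDITION & SPEC =====
def Spec_find_factorization (x : Int) (alpha : Int) (beta : Int) (out : Option Int × Option Int) : Prop := out = find_factorization_alt x alpha beta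
instance (x : Int) (alpha : Int) (beta : Int) (out : Option Int × Option Int) : Decidable (Spec_find_factorization x alpha beta out) := by unfold Spec_find_factorization; infer_instance

-- ===== CLAIM (what is proved, stated in full; the proofs are below) =====
def Claim_equal_find_factorization : Prop := ∀ (x : Int) (alpha : Int) (beta : Int), Dom_find_factorization x alpha beta → Spec_find_factorization x alpha beta (find_factorization x alpha beta)

-- ===== LEMMAS AND PROOFS =====

-- state abbreviation used only by the proofs
def pvSt : Type := (Option Int × Option Int) × Option Int

def pvStepA (x alpha beta n : Int) (st : pvSt) (m : Int) : pvSt :=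
  if pvLtInf (alpha * |x - n * m| + beta * |n - m|) st.2 && decide (x ≤ n * m) then
    ((some n, some m), some (alpha * |x - n * m| + beta * |n - m|)) else st

def pvStepB (x alpha beta : Int) (st : pvSt) (n : Int) : pvSt :=
  let m0 := max n (-(PySem.Int.floordiv (-x) n))
  let m := if alpha * n + beta ≥ 0 then m0 else x
  let l := alpha * (n * m - x) + beta * (m - n)
  if pvLtInf l st.2 then ((some n, some m), some l) else st

theorem pvFfA_eq (x alpha beta : Int) :
    find_factorization x alpha beta =
      ((PySem.List.pyRange 1 (x + 1) 1).foldl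
        (fun st n => (PySem.List.pyRange n (x + 1) 1).foldl (pvStepA x alpha beta n) st)
        ((none, none), none)).1 := rfl

theorem pvFfB_eq (x alpha beta : Int) :
    find_factorization_alt x alpha beta =
      ((PySem.List.pyRange 1 (x + 1) 1).foldl (pvStepB x alpha beta) ((none, none), none)).1 := rfl

theorem pvFoldl_congr_mem {α : Type} (l : List α) (f g : pvSt → α → pvSt) (st : pvSt)
    (h : ∀ st' a, a ∈ l → f st' a = g st' a) : l.foldl f st = l.foldl g st := by
  induction l generalizing st with
  | nil => rfl
  | cons a t ih =>
    simp only [List.foldl_cons]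
    rw [h st a (by simp)]
    exact ih _ (fun st' a' ha' => h st' a' (by simp [ha']))

theorem pvNoopInvalid (x alpha beta n : Int) (l : List Int) (st : pvSt)
    (h : ∀ m ∈ l, ¬ x ≤ n * m) : l.foldl (pvStepA x alpha beta n) st = st := by
  induction l generalizing st with
  | nil => rfl
  | cons m t ih =>
    simp only [List.foldl_cons]
    have : pvStepA x alpha beta n st m = st := by
      unfold pvStepA
      have := h m (by simp)
      simp [this]
    rw [this]
    exact ih st (fun m' hm' => h m' (by simp [hm']))

theorem pvNoopNoImprove (x alpha beta n : Int) (l : List Int) (st : pvSt)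
    (h : ∀ m ∈ l, pvLtInf (alpha * |x - n * m| + beta * |n - m|) st.2 = false) :
    l.foldl (pvStepA x alpha beta n) st = st := by
  induction l generalizing st with
  | nil => rfl
  | cons m t ih =>
    simp only [List.foldl_cons]
    have h1 : pvStepA x alpha beta n st m = st := by
      unfold pvStepA
      simp [h m (by simp)]
    rw [h1]
    exact ih st (fun m' hm' => h m' (by simp [hm']))

-- the core per-n lemma
theorem pvInner (x alpha beta n : Int) (hn : 1 ≤ n) (hnx : n ≤ x) (st : pvSt) :
    (PySem.List.pyRange n (x + 1) 1).foldl (pvStepA x alpha beta n) st =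
      pvStepB x alpha beta st n := by
  have hnpos : 0 < n := hn
  set c : Int := -(PySem.Int.floordiv (-x) n) with hc
  have hceil : (c - 1) * n < x ∧ x ≤ c * n :=
    (PySem.Int.neg_floordiv_neg_eq_iff_of_pos hnpos).1 hc.symm
  set m0 : Int := max n c with hm0
  have hnm0 : n ≤ m0 := le_max_left _ _
  have hcm0 : c ≤ m0 := le_max_right _ _
  have hm0x : m0 ≤ x := by
    rcases max_cases n c with ⟨h1, _⟩ | ⟨h1, _⟩
    · omega
    · have h2 : c - 1 ≤ (c - 1) * n := le_mul_of_one_le_right (by omega) hn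
      linarith [hceil.1, h2]
  -- validity for m ≥ m0
  have hvalid : ∀ m : Int, m0 ≤ m → x ≤ n * m := by
    intro m hm
    have h2 : c * n ≤ m * n :=
      mul_le_mul_of_nonneg_right (by omega) (by omega)
    linarith [hceil.2, h2]
  -- invalidity below m0
  have hinvalid : ∀ m : Int, n ≤ m → m < m0 → ¬ x ≤ n * m := by
    intro m hm1 hm2
    have hmc : m < c := by
      rcases max_cases n c with ⟨h1, _⟩ | ⟨h1, _⟩ <;> omega
    have h2 : n * m ≤ n * (c - 1) :=
      mul_le_mul_of_nonneg_left (by omega) (by omega)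
    linarith [hceil.1, h2]
  -- |·| form of the loss on the valid range
  have habs : ∀ m : Int, m0 ≤ m →
      alpha * |x - n * m| + beta * |n - m| = alpha * (n * m - x) + beta * (m - n) := by
    intro m hm
    rw [abs_of_nonpos (by have := hvalid m hm; omega), abs_of_nonpos (by omega)]
    ring
  -- split the range at m0
  rw [PySem.List.pyRange_one_append n m0 (x + 1) hnm0 (by omega), List.foldl_append,
    pvNoopInvalid x alpha beta n _ st
      (by intro m hm; rw [PySem.List.mem_pyRange_one] at hm; exact hinvalid m hm.1 hm.2)]
  -- the valid segment
  by_cases hs : alpha * n + beta ≥ 0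
  · -- slope ≥ 0: only the first element m0 can update
    rw [PySem.List.pyRange_one_cons (by omega), List.foldl_cons]
    have hmono : ∀ m : Int, m0 ≤ m →
        alpha * (n * m0 - x) + beta * (m0 - n) ≤ alpha * (n * m - x) + beta * (m - n) := by
      intro m hm
      linarith [mul_nonneg hs (show (0:Int) ≤ m - m0 by omega)]
    have hrest : ∀ m ∈ PySem.List.pyRange (m0 + 1) (x + 1) 1,
        pvLtInf (alpha * |x - n * m| + beta * |n - m|)
          (pvStepA x alpha beta n st m0).2 = false := by
      intro m hm
      rw [PySem.List.mem_pyRange_one] at hm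
      rw [habs m (by omega)]
      unfold pvStepA
      split
      · rename_i hcond
        simp only [pvLtInf, decide_eq_false_iff_not, not_lt]
        rw [habs m0 le_rfl]
        exact hmono m (by omega)
      · rename_i hcond
        simp only [Bool.and_eq_true, decide_eq_true_eq, not_and] at hcond
        cases hst2 : st.2 with
        | none =>
          exfalso
          apply hcond
          · simp [pvLtInf, hst2]
          · exact hvalid m0 le_rfl
        | some cc =>
          simp only [pvLtInf, decide_eq_false_iff_not, not_lt]
          have hle : cc ≤ alpha * |x - n * m0| + beta * |n - m0| := by
            by_contra hlt
            apply hcond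
            · simp [pvLtInf, hst2]; omega
            · exact hvalid m0 le_rfl
          rw [habs m0 le_rfl] at hle
          exact le_trans hle (hmono m (by omega))
    rw [pvNoopNoImprove x alpha beta n _ _ hrest]
    -- stepA at m0 = stepB
    unfold pvStepA pvStepB
    simp only [← hc, ← hm0, if_pos hs]
    rw [habs m0 le_rfl]
    simp [hvalid m0 le_rfl]
  · -- slope < 0: the fold over [k, x] always ends at the step for m = x
    have hslt : alpha * n + beta < 0 := by omega
    have hdec : ∀ k : Int, m0 ≤ k → k ≤ x → ∀ st' : pvSt,
        (PySem.List.pyRange k (x + 1) 1).foldl (pvStepA x alpha beta n) st' =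
          pvStepA x alpha beta n st' x := by
      intro k hk hkx
      have hnum : ∃ d : Nat, x - k = (d : Int) := ⟨(x - k).toNat, by omega⟩
      obtain ⟨d, hd⟩ := hnum
      induction d generalizing k with
      | zero =>
        intro st'
        have : k = x := by omega
        subst this
        rw [PySem.List.pyRange_one_singleton]
        rfl
      | succ d ih =>
        intro st'
        have hkxlt : k < x := by omega
        rw [PySem.List.pyRange_one_cons (by omega), List.foldl_cons,
          ih (k + 1) (by omega) (by omega) (by omega)]
        -- show stepA (stepA st' k) x = stepA st' x
        have hlt : alpha * (n * x - x) + beta * (x - n) < alpha * (n * k - x) + beta * (k - n) := by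
          linarith [mul_pos_of_neg_of_neg hslt (show k - x < 0 by omega)]
        unfold pvStepA
        rw [habs k hk, habs x (by omega)]
        split
        · rename_i hcond
          simp only [Bool.and_eq_true, decide_eq_true_eq] at hcond
          have h1 : pvLtInf (alpha * (n * x - x) + beta * (x - n)) (some (alpha * (n * k - x) + beta * (k - n))) = true := by
            simp [pvLtInf]; omega
          have h2 : pvLtInf (alpha * (n * x - x) + beta * (x - n)) st'.2 = true := by
            cases hst2 : st'.2 with
            | none => simp [pvLtInf]
            | some cc =>
              have := hcond.1
              simp [pvLtInf, hst2] at this ⊢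
              omega
          simp [h1, h2, hvalid x (by omega)]
        · rfl
    rw [hdec m0 le_rfl hm0x st]
    unfold pvStepA pvStepB
    simp only [← hc, ← hm0, if_neg hs]
    rw [habs x (by omega)]
    simp [hvalid x (by omega)]

-- ===== VERDICT (by name: the statement is the Claim_ definition above) =====
theorem find_factorization_spec : Claim_equal_find_factorization := by
  intro x alpha beta _
  unfold Spec_find_factorization
  rw [pvFfA_eq, pvFfB_eq]
  congr 1
  apply pvFoldl_congr_mem
  intro st n hn
  rw [PySem.List.mem_pyRange_one] at hn
  exact pvInner x alpha beta n hn.1 (by omega) st
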